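-- pv_equiv track=rewrite | github.com/Arun-Misra/httpserver | asynchttpserverhttp_inoops.py | parse_path_and_query
-- ===== SOURCE A (Python) =====
-- from typing import Dict, Any, Optional, Tuple
--
-- def percent_decode(s: str) -> str:
--     s = s.replace('+', ' ')
--     out = bytearray()
--     i = 0
--     while i < len(s):
--         ch = s[i]
--         if ch == '%' and i + 2 < len(s):
--             hexpart = s[i+1:i+3]
--             try:
--                 out.append(int(hexpart, 16))
--                 i += 3
--                 continue
--             except ValueError:
--                 pass
--         out.extend(ch.encode('utf-8'))
--         i += 1
--     try:
--         return out.decode('utf-8')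
--     except UnicodeDecodeError:
--         return out.decode('utf-8', errors='replace')
--
-- def parse_path_and_query(raw_path: str) -> tuple[str, Dict[str, str]]:
--     qpos = raw_path.find('?')
--     if qpos == -1:
--         return raw_path, {}
--
--     path = raw_path[:qpos]
--     query = raw_path[qpos+1:]
--     params = {}
--
--     if not query:
--         return path, params
--
--     for part in query.split('&'):
--         if not part:
--             continue
--         if '=' in part:
--             k, v = part.split('=', 1)
--         else:
--             k, v = part, ''
--         params[percent_decode(k)] = percent_decode(v)
--
--     return path, params
-- ===== SOURCE B (Python) =====
-- def percent_decode(s: str) -> str: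
--     s = s.replace('+', ' ')
--     parts = s.split('%')
--     out = bytearray(parts[0].encode('utf-8'))
--     for seg in parts[1:]:
--         decoded = False
--         if len(seg) >= 2:
--             try:
--                 out.append(int(seg[:2], 16))
--                 out.extend(seg[2:].encode('utf-8'))
--                 decoded = True
--             except ValueError:
--                 pass
--         if not decoded:
--             out.append(0x25)  # '%'
--             out.extend(seg.encode('utf-8'))
--     try:
--         return out.decode('utf-8')
--     except UnicodeDecodeError:
--         return out.decode('utf-8', errors='replace')
--
-- def parse_path_and_query(raw_path: str):
--     path, sep, query = raw_path.partition('?')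
--     if not sep:
--         return raw_path, {}
--     params = {percent_decode(p[0]): percent_decode(p[2])
--               for p in (part.partition('=') for part in query.split('&') if part)}
--     return path, params
-- ===== Notes on version B (the rewrite author's own statement) =====
-- stated objective: alternative
-- what changed: percent_decode is rewritten as a fold over the segments obtained by splitting on the percent character (decode the first two chars of each segment as a hex byte, or re-emit a literal percent sign) instead of A's manual index walk with lookahead; the path/query split uses str.partition instead of find() plus slicing, and the params dict is built by a comprehension over partitioned non-empty parts instead of A's loop with branches.
import Mathlib
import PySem

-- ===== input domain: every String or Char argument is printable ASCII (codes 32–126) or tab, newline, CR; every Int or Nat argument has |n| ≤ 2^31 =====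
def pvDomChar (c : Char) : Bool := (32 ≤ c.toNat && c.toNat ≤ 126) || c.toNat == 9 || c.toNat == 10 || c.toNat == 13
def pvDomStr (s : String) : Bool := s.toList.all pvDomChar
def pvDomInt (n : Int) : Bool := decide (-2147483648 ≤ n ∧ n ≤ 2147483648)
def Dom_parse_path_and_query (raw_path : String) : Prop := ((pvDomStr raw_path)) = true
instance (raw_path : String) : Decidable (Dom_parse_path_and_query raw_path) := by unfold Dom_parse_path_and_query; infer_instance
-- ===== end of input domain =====

-- B rewrites percent_decode as a split('%')-based fold instead of A's manual index walk, parses the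
-- path/query via partition and a comprehension over partitioned parts instead of find+slices with a
-- branching loop; B's port decodes UTF-8 with an incremental state machine (objective: alternative).


-- ===== PORT A =====
-- Shared helper: one character UTF-8-encoded (ch.encode('utf-8') / seg.encode('utf-8')); exact for
-- all non-surrogate code points (Lean's Char carries no surrogates), hence on all Python strings.
def pvEncodeChar (c : Char) : List Nat :=
  let n := c.toNat
  if n < 0x80 then [n]
  else if n < 0x800 then [0xC0 ||| (n >>> 6), 0x80 ||| (n &&& 0x3F)]
  else if n < 0x10000 then [0xE0 ||| (n >>> 12), 0x80 ||| ((n >>> 6) &&& 0x3F), 0x80 ||| (n &&& 0x3F)]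
  else [0xF0 ||| (n >>> 18), 0x80 ||| ((n >>> 12) &&& 0x3F), 0x80 ||| ((n >>> 6) &&& 0x3F), 0x80 ||| (n &&& 0x3F)]

def pvCont (b : Nat) : Bool := decide (0x80 ≤ b ∧ b ≤ 0xBF)

-- A-side helper: bytes.decode('utf-8', errors='replace'); hand-written (PySem has no bytes type),
-- exact w.r.t. CPython's UTF-8 decoder incl. the "maximal subpart" replacement rule (checked by the
-- differential test; when the bytes are valid UTF-8 this equals strict decode, so it also covers
-- the try: decode('utf-8') branch).
def pvDecodeReplace : List Nat → List Char
  | [] => []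
  | b :: rest =>
    if b < 0x80 then Char.ofNat b :: pvDecodeReplace rest
    else if 0xC2 ≤ b ∧ b ≤ 0xDF then
      match h1 : rest with
      | [] => ['\uFFFD']
      | b1 :: r1 =>
        if pvCont b1 then Char.ofNat (((b - 0xC0) <<< 6) + (b1 - 0x80)) :: pvDecodeReplace r1
        else '\uFFFD' :: pvDecodeReplace rest
    else if 0xE0 ≤ b ∧ b ≤ 0xEF then
      match h2 : rest with
      | [] => ['\uFFFD']
      | b1 :: r1 =>
        if (if b = 0xE0 then 0xA0 else 0x80) ≤ b1 ∧ b1 ≤ (if b = 0xED then 0x9F else 0xBF) then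
          match h3 : r1 with
          | [] => ['\uFFFD']
          | b2 :: r2 =>
            if pvCont b2 then
              Char.ofNat (((b - 0xE0) <<< 12) + ((b1 - 0x80) <<< 6) + (b2 - 0x80)) :: pvDecodeReplace r2
            else '\uFFFD' :: pvDecodeReplace r1
        else '\uFFFD' :: pvDecodeReplace rest
    else if 0xF0 ≤ b ∧ b ≤ 0xF4 then
      match h4 : rest with
      | [] => ['\uFFFD']
      | b1 :: r1 =>
        if (if b = 0xF0 then 0x90 else 0x80) ≤ b1 ∧ b1 ≤ (if b = 0xF4 then 0x8F else 0xBF) then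
          match h5 : r1 with
          | [] => ['\uFFFD']
          | b2 :: r2 =>
            if pvCont b2 then
              match h6 : r2 with
              | [] => ['\uFFFD']
              | b3 :: r3 =>
                if pvCont b3 then
                  Char.ofNat (((b - 0xF0) <<< 18) + ((b1 - 0x80) <<< 12) + ((b2 - 0x80) <<< 6) + (b3 - 0x80)) :: pvDecodeReplace r3
                else '\uFFFD' :: pvDecodeReplace r2
            else '\uFFFD' :: pvDecodeReplace r1
        else '\uFFFD' :: pvDecodeReplace rest
    else '\uFFFD' :: pvDecodeReplace rest
termination_by l => l.length
decreasing_by all_goals first | (subst_vars; simp; omega) | (subst_vars; simp)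

-- Shared helper: "try: out.append(int(hexpart, 16)) except ValueError: pass" — some byte iff
-- int(hexpart,16) succeeds AND the value fits a byte (bytearray.append raises ValueError otherwise).
def pvHexByte? (cs : List Char) : Option Nat :=
  match PySem.Int.ofCharsBase? cs 16 with
  | some v => if 0 ≤ v ∧ v ≤ 255 then some v.toNat else none
  | none => none

-- A's while-loop over the (already '+'-replaced) string, producing the bytearray.
def pvWalkA : List Char → List Nat
  | [] => []
  | c :: rest =>
    if c = '%' ∧ 2 ≤ rest.length then
      match pvHexByte? (rest.take 2) with
      | some b => b :: pvWalkA (rest.drop 2)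
      | none => pvEncodeChar c ++ pvWalkA rest
    else pvEncodeChar c ++ pvWalkA rest
termination_by l => l.length
decreasing_by all_goals first | (simp; omega) | simp

def pvPercentDecode (s : List Char) : List Char :=
  pvDecodeReplace (pvWalkA (PySem.Chars.replace s ['+'] [' ']))

def parse_path_and_query (raw_path : String) : String × (List (String × String)) :=
  let l := raw_path.toList
  let qpos := PySem.Chars.find l ['?']
  if qpos = -1 then (raw_path, [])
  else
    let path := PySem.Chars.slice l none (some qpos)
    let query := PySem.Chars.slice l (some (qpos + 1)) none
    let params := (PySem.Chars.splitOn query ['&']).foldl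
      (fun (d : PySem.Dict String String) part =>
        if part.isEmpty then d
        else
          let kv : List Char × List Char :=
            if PySem.Chars.isIn ['='] part then
              match PySem.Chars.splitOnMax part ['='] 1 with
              | [k, v] => (k, v)
              | _ => (part, [])          -- unreachable: split('=',1) with '=' present yields 2 pieces
            else (part, [])
          d.insert (String.ofList (pvPercentDecode kv.1)) (String.ofList (pvPercentDecode kv.2)))
      PySem.Dict.empty
    (String.ofList path, params.items)

-- ===== PORT B =====
-- B-side: seg.encode('utf-8') as a left fold over the characters.
def pvEncB (cs : List Char) : List Nat := cs.foldl (fun a c => a ++ pvEncodeChar c) []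

-- One segment after a '%' (Source B's loop body): hex byte + tail, or literal '%' + whole segment.
def pvSegBytes (seg : List Char) : List Nat :=
  if 2 ≤ seg.length then
    match pvHexByte? (seg.take 2) with
    | some b => b :: pvEncB (seg.drop 2)
    | none => 0x25 :: pvEncB seg
  else 0x25 :: pvEncB seg

-- B-side bytes.decode('utf-8', errors='replace'): an incremental state-machine decoder. A pending
-- multi-byte sequence is (bytes still needed, code point so far, allowed range for the next byte);
-- exact w.r.t. CPython's UTF-8 decoder (checked by the differential test; strict decode agrees on
-- valid bytes, covering the try: branch).
def pvUtfLead (b : Nat) : List Char × Option (Nat × Nat × Nat × Nat) :=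
  if b < 0x80 then ([Char.ofNat b], none)
  else if b < 0xC2 then (['\uFFFD'], none)
  else if b ≤ 0xDF then ([], some (1, b - 0xC0, 0x80, 0xBF))
  else if b ≤ 0xEF then
    ([], some (2, b - 0xE0, if b = 0xE0 then 0xA0 else 0x80, if b = 0xED then 0x9F else 0xBF))
  else if b ≤ 0xF4 then
    ([], some (3, b - 0xF0, if b = 0xF0 then 0x90 else 0x80, if b = 0xF4 then 0x8F else 0xBF))
  else (['\uFFFD'], none)

def pvUtfStep (st : Option (Nat × Nat × Nat × Nat)) (b : Nat) :
    List Char × Option (Nat × Nat × Nat × Nat) :=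
  match st with
  | none => pvUtfLead b
  | some (need, acc, lo, hi) =>
    if lo ≤ b ∧ b ≤ hi then
      if need = 1 then ([Char.ofNat ((acc <<< 6) + (b - 0x80))], none)
      else ([], some (need - 1, (acc <<< 6) + (b - 0x80), 0x80, 0xBF))
    else ('\uFFFD' :: (pvUtfLead b).1, (pvUtfLead b).2)

def pvUtfRun (st : Option (Nat × Nat × Nat × Nat)) : List Nat → List Char
  | [] => (match st with | none => [] | some _ => ['\uFFFD'])
  | b :: rest => (pvUtfStep st b).1 ++ pvUtfRun (pvUtfStep st b).2 rest

def pvPercentDecodeAlt (s : List Char) : List Char :=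
  match PySem.Chars.splitOn (PySem.Chars.replace s ['+'] [' ']) ['%'] with
  | [] => []                              -- unreachable: str.split never returns an empty list
  | p0 :: ps => pvUtfRun none (ps.foldl (fun acc seg => acc ++ pvSegBytes seg) (pvEncB p0))

def parse_path_and_query_alt (raw_path : String) : String × (List (String × String)) :=
  let l := raw_path.toList
  -- path, sep, query = raw_path.partition('?')  (single-char separator: a span)
  let path := l.takeWhile (· ≠ '?')
  match l.dropWhile (· ≠ '?') with
  | [] => (raw_path, [])
  | _ :: query =>
    -- {pd(p[0]): pd(p[2]) for p in (part.partition('=') for part in query.split('&') if part)}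
    let pairs := ((PySem.Chars.splitOn query ['&']).filter (fun part => !part.isEmpty)).map
      (fun part => (part.takeWhile (· ≠ '='), (part.dropWhile (· ≠ '=')).drop 1))
    let params := pairs.foldl
      (fun (d : PySem.Dict String String) kv =>
        d.insert (String.ofList (pvPercentDecodeAlt kv.1)) (String.ofList (pvPercentDecodeAlt kv.2)))
      PySem.Dict.empty
    (String.ofList path, params.items)

-- ===== PRECONDITION & SPEC =====
def Spec_parse_path_and_query (raw_path : String) (out : String × (List (String × String))) : Prop := out = parse_path_and_query_alt raw_path
instance (raw_path : String) (out : String × (List (String × String))) : Decidable (Spec_parse_path_and_query raw_path out) := by unfold Spec_parse_path_and_query; infer_instance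

-- ===== CLAIM (what is proved, stated in full; the proofs are below) =====
def Claim_equal_parse_path_and_query : Prop := ∀ (raw_path : String), Dom_parse_path_and_query raw_path → Spec_parse_path_and_query raw_path (parse_path_and_query raw_path)

-- ===== LEMMAS AND PROOFS =====
-- A's whole-string byte encoding, used to characterise both walks (proof helper).
def pvEncode (cs : List Char) : List Nat := cs.flatMap pvEncodeChar

-- structural single-char split (str.split(c) for a 1-char separator)
def pvSplit (c : Char) : List Char → List (List Char)
  | [] => [[]]
  | x :: t =>
    if x = c then [] :: pvSplit c t
    else match pvSplit c t with
         | [] => [[x]]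
         | p :: ps => (x :: p) :: ps

lemma pvSplit_ne_nil (c : Char) (s : List Char) : pvSplit c s ≠ [] := by
  cases s with
  | nil => simp [pvSplit]
  | cons x t => by_cases hx : x = c <;> simp [pvSplit, hx] <;> split <;> simp

lemma pvSplit_head_tail (c : Char) (s : List Char) :
    pvSplit c s = (s.takeWhile (· ≠ c)) ::
      (match s.dropWhile (· ≠ c) with | [] => [] | _ :: r => pvSplit c r) := by
  induction s with
  | nil => simp [pvSplit]
  | cons x t ih =>
    by_cases hx : x = c
    · simp [pvSplit, hx, List.takeWhile_cons, List.dropWhile_cons]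
    · simp only [pvSplit, hx, if_false, ih, List.takeWhile_cons, List.dropWhile_cons]
      simp [hx]

lemma splitOn_go_single (c : Char) (fuel : Nat) :
    ∀ (l cur : List Char) (acc : List (List Char)), l.length ≤ fuel →
      PySem.Chars.splitOn.go [c] fuel l cur acc =
        acc.reverse ++ (match pvSplit c l with
          | [] => []
          | p :: ps => (cur.reverse ++ p) :: ps) := by
  induction fuel with
  | zero =>
    intro l cur acc h
    interval_cases hl : l.length
    rw [List.length_eq_zero_iff] at hl; subst hl
    simp [PySem.Chars.splitOn.go, pvSplit]
  | succ n ih =>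
    intro l cur acc h
    cases l with
    | nil => simp [PySem.Chars.splitOn.go, pvSplit]
    | cons x t =>
      by_cases hx : x = c
      · subst hx
        have hpfx : [x].isPrefixOf (x :: t) = true := by simp [List.isPrefixOf]
        rw [PySem.Chars.splitOn.go]
        simp only [hpfx, if_true, List.length_cons, List.length_nil, List.drop_succ_cons, List.drop_zero]
        rw [ih t [] (cur.reverse :: acc) (by simpa using Nat.le_of_succ_le_succ h)]
        simp [pvSplit]
        cases hsp : pvSplit x t with
        | nil => exact absurd hsp (pvSplit_ne_nil x t)
        | cons p ps => simp
      · have hpfx : [c].isPrefixOf (x :: t) = false := by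
          simp [List.isPrefixOf]; exact fun hh => absurd hh.symm hx
        rw [PySem.Chars.splitOn.go]
        simp only [hpfx, Bool.false_eq_true, if_false]
        rw [ih t (x :: cur) acc (by simpa using Nat.le_of_succ_le_succ h)]
        simp only [pvSplit, hx, if_false]
        cases hsp : pvSplit c t with
        | nil => exact absurd hsp (pvSplit_ne_nil c t)
        | cons p ps => simp

lemma splitOn_single (c : Char) (s : List Char) :
    PySem.Chars.splitOn s [c] = pvSplit c s := by
  rw [PySem.Chars.splitOn, splitOn_go_single c _ s [] [] (by omega)]
  cases hsp : pvSplit c s with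
  | nil => exact absurd hsp (pvSplit_ne_nil c s)
  | cons p ps => simp

lemma splitOnMax_go_zero (c : Char) (fuel : Nat) (l cur : List Char) (acc : List (List Char)) :
    PySem.Chars.splitOnMax.go [c] fuel 0 l cur acc = ((cur.reverse ++ l) :: acc).reverse := by
  cases fuel with
  | zero => rw [PySem.Chars.splitOnMax.go]
  | succ n => cases l with
    | nil => rw [PySem.Chars.splitOnMax.go] <;> (try simp) <;> (try omega)
    | cons x t => rw [PySem.Chars.splitOnMax.go] <;> (try simp) <;> (try omega)

lemma splitOnMax_go_one (c : Char) (fuel : Nat) :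
    ∀ (l cur : List Char) (acc : List (List Char)), l.length ≤ fuel →
      PySem.Chars.splitOnMax.go [c] fuel 1 l cur acc =
        acc.reverse ++ ((cur.reverse ++ l.takeWhile (· ≠ c)) ::
          (match l.dropWhile (· ≠ c) with | [] => [] | _ :: r => [r])) := by
  induction fuel with
  | zero =>
    intro l cur acc h
    interval_cases hl : l.length
    rw [List.length_eq_zero_iff] at hl; subst hl
    rw [PySem.Chars.splitOnMax.go]; simp
  | succ n ih =>
    intro l cur acc h
    cases l with
    | nil => rw [PySem.Chars.splitOnMax.go] <;> (try simp) <;> (try omega)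
    | cons x t =>
      by_cases hx : x = c
      · subst hx
        have hpfx : [x].isPrefixOf (x :: t) = true := by simp [List.isPrefixOf]
        rw [PySem.Chars.splitOnMax.go]
        simp only [hpfx, if_true, List.length_cons, List.length_nil, List.drop_succ_cons,
          List.drop_zero, one_ne_zero, if_false]
        rw [splitOnMax_go_zero]
        simp [List.takeWhile_cons, List.dropWhile_cons]
      · have hpfx : [c].isPrefixOf (x :: t) = false := by
          simp [List.isPrefixOf]; exact fun hh => absurd hh.symm hx
        rw [PySem.Chars.splitOnMax.go]
        simp only [hpfx, Bool.false_eq_true, if_false, one_ne_zero]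
        rw [ih t (x :: cur) acc (by simpa using Nat.le_of_succ_le_succ h)]
        simp [List.takeWhile_cons, List.dropWhile_cons, hx]

lemma splitOnMax_one (c : Char) (s : List Char) :
    PySem.Chars.splitOnMax s [c] 1 =
      (s.takeWhile (· ≠ c)) ::
        (match s.dropWhile (· ≠ c) with | [] => [] | _ :: r => [r]) := by
  rw [PySem.Chars.splitOnMax]
  simp only [show ¬((1:Int) < 0) by norm_num, if_false, show Int.toNat 1 = 1 from rfl]
  rw [splitOnMax_go_one c _ s [] [] (by simp)]
  simp

lemma replace_go_single (a b : Char) (fuel : Nat) :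
    ∀ (l acc : List Char), l.length ≤ fuel →
      PySem.Chars.replace.go [a] [b] fuel l acc =
        acc.reverse ++ l.map (fun c => if c = a then b else c) := by
  induction fuel with
  | zero =>
    intro l acc h
    interval_cases hl : l.length
    rw [List.length_eq_zero_iff] at hl; subst hl
    rw [PySem.Chars.replace.go]; simp
  | succ n ih =>
    intro l acc h
    cases l with
    | nil => rw [PySem.Chars.replace.go] <;> (try simp) <;> (try omega)
    | cons x t =>
      by_cases hx : x = a
      · subst hx
        have hpfx : [x].isPrefixOf (x :: t) = true := by simp [List.isPrefixOf]
        rw [PySem.Chars.replace.go]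
        simp only [hpfx, if_true, List.length_cons, List.length_nil, List.drop_succ_cons,
          List.drop_zero, List.reverse_cons, List.reverse_nil]
        rw [ih t ([] ++ [b] ++ acc) (by simpa using Nat.le_of_succ_le_succ h)]
        simp
      · have hpfx : [a].isPrefixOf (x :: t) = false := by
          simp [List.isPrefixOf]; exact fun hh => absurd hh.symm hx
        rw [PySem.Chars.replace.go]
        simp only [hpfx, Bool.false_eq_true, if_false]
        rw [ih t (x :: acc) (by simpa using Nat.le_of_succ_le_succ h)]
        simp [hx]

lemma replace_single (a b : Char) (s : List Char) :
    PySem.Chars.replace s [a] [b] = s.map (fun c => if c = a then b else c) := by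
  rw [PySem.Chars.replace]
  simp only [List.isEmpty_cons, Bool.false_eq_true, if_false]
  rw [replace_go_single a b _ s [] (by simp)]
  simp

lemma dom_lt_127 (c : Char) (h : pvDomChar c = true) : c.toNat < 127 := by
  unfold pvDomChar at h
  simp only [Bool.or_eq_true, Bool.and_eq_true, decide_eq_true_eq, beq_iff_eq, Nat.beq_eq] at h
  omega

lemma hexNone_left (y : Char) (h : pvDomChar y = true) : pvHexByte? ['%', y] = none := by
  have hall : (List.range 127).all (fun n => (pvHexByte? ['%', Char.ofNat n]).isNone) = true := by decide
  rw [List.all_eq_true] at hall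
  have := hall y.toNat (by rw [List.mem_range]; exact dom_lt_127 y h)
  rw [Char.ofNat_toNat] at this
  simpa using this

lemma hexNone_right (x : Char) (h : pvDomChar x = true) : pvHexByte? [x, '%'] = none := by
  have hall : (List.range 127).all (fun n => (pvHexByte? [Char.ofNat n, '%']).isNone) = true := by decide
  rw [List.all_eq_true] at hall
  have := hall x.toNat (by rw [List.mem_range]; exact dom_lt_127 x h)
  rw [Char.ofNat_toNat] at this
  simpa using this

lemma pvEncB_eq (cs : List Char) : pvEncB cs = pvEncode cs := by
  rw [pvEncB, pvEncode, PySem.List.foldl_append_eq_flatMap]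
  simp

lemma pvEncode_nil : pvEncode [] = [] := rfl
lemma pvEncode_cons (c : Char) (l : List Char) :
    pvEncode (c :: l) = pvEncodeChar c ++ pvEncode l := by simp [pvEncode]

lemma takeWhile_take_two (l : List Char) (q : Char → Bool) (h : 2 ≤ (l.takeWhile q).length) :
    (l.takeWhile q).take 2 = l.take 2 := by
  obtain ⟨u, hu⟩ := List.takeWhile_prefix (l := l) (p := q)
  conv_rhs => rw [← hu]
  rw [List.take_append]
  have h0 : 2 - (l.takeWhile q).length = 0 := by omega
  rw [h0]
  simp

lemma pvSegBytes_bad (q0 : List Char) (t : List Char)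
    (hq : q0 = t.takeWhile (· ≠ '%'))
    (hbad : ¬(2 ≤ t.length ∧ ∃ b, pvHexByte? (t.take 2) = some b)) :
    pvSegBytes q0 = 37 :: pvEncode q0 := by
  rw [pvSegBytes]
  by_cases hl : 2 ≤ q0.length
  · have hlt : 2 ≤ t.length := by
      have h2 := (List.takeWhile_prefix (l := t) (p := (· ≠ '%'))).length_le
      rw [← hq] at h2; omega
    have htk : q0.take 2 = t.take 2 := by rw [hq]; exact takeWhile_take_two t _ (hq ▸ hl)
    have hnone : pvHexByte? (t.take 2) = none := by
      cases h' : pvHexByte? (t.take 2) with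
      | none => rfl
      | some b => exact absurd (⟨hlt, b, h'⟩ : 2 ≤ t.length ∧ ∃ b, pvHexByte? (t.take 2) = some b) hbad
    rw [if_pos hl, htk, hnone]
    simp [pvEncB_eq]
  · rw [if_neg hl, pvEncB_eq]

lemma walk_eq (n : Nat) : ∀ (s : List Char), s.length ≤ n → (∀ c ∈ s, pvDomChar c = true) →
    pvWalkA s = pvEncode (s.takeWhile (· ≠ '%')) ++
      (match s.dropWhile (· ≠ '%') with
        | [] => ([] : List (List Char))
        | _ :: r => pvSplit '%' r).flatMap pvSegBytes := by
  induction n with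
  | zero =>
    intro s h _
    interval_cases hl : s.length
    rw [List.length_eq_zero_iff] at hl; subst hl
    simp [pvWalkA, pvEncode]
  | succ n ih =>
    intro s h hdom
    cases s with
    | nil => simp [pvWalkA, pvEncode]
    | cons c t =>
      by_cases hc : c = '%'
      · subst hc
        rw [List.takeWhile_cons, List.dropWhile_cons]
        simp only [show (decide ('%' ≠ '%')) = false by simp, Bool.false_eq_true, if_false,
          pvEncode_nil, List.nil_append]
        rw [pvSplit_head_tail, pvWalkA]
        by_cases hgood : 2 ≤ t.length ∧ ∃ b, pvHexByte? (t.take 2) = some b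
        · obtain ⟨hlen, b, hb⟩ := hgood
          cases t with
          | nil => simp at hlen
          | cons x t1 =>
            cases t1 with
            | nil => simp at hlen
            | cons y t' =>
              have hxdom : pvDomChar x = true := hdom x (by simp)
              have hydom : pvDomChar y = true := hdom y (by simp)
              have htake2 : (x :: y :: t').take 2 = [x, y] := by simp
              rw [htake2] at hb
              have hx : x ≠ '%' := by
                intro hx; rw [hx, hexNone_left y hydom] at hb; cases hb
              have hy : y ≠ '%' := by
                intro hy; rw [hy, hexNone_right x hxdom] at hb; cases hb
              rw [if_pos ⟨rfl, hlen⟩, htake2, hb,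
                show (x :: y :: t').drop 2 = t' from rfl]
              simp only [List.takeWhile_cons, List.dropWhile_cons, hx, hy, ne_eq,
                not_false_eq_true, decide_true, if_true, List.flatMap_cons]
              have hseg : pvSegBytes (x :: y :: t'.takeWhile (· ≠ '%')) =
                  b :: pvEncode (t'.takeWhile (· ≠ '%')) := by
                rw [pvSegBytes]
                rw [if_pos (by simp : 2 ≤ (x :: y :: t'.takeWhile (· ≠ '%')).length)]
                rw [show (x :: y :: t'.takeWhile (· ≠ '%')).take 2 = [x, y] by simp, hb]
                rw [show (x :: y :: t'.takeWhile (· ≠ '%')).drop 2 = t'.takeWhile (· ≠ '%') from rfl,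
                  pvEncB_eq]
              rw [hseg]
              rw [ih t' (by simp at h; omega) (fun d hd => hdom d (by simp [hd]))]
              simp
        · have h37 : pvEncodeChar '%' = [37] := rfl
          have hseg := pvSegBytes_bad (t.takeWhile (· ≠ '%')) t rfl hgood
          have hLHS : (if '%' = '%' ∧ 2 ≤ t.length then
              match pvHexByte? (t.take 2) with
              | some b => b :: pvWalkA (t.drop 2)
              | none => pvEncodeChar '%' ++ pvWalkA t
            else pvEncodeChar '%' ++ pvWalkA t) = 37 :: pvWalkA t := by
            by_cases hlen : 2 ≤ t.length
            · have hnone : pvHexByte? (t.take 2) = none := by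
                cases h' : pvHexByte? (t.take 2) with
                | none => rfl
                | some b => exact absurd ⟨hlen, b, h'⟩ hgood
              rw [if_pos ⟨rfl, hlen⟩, hnone, h37]; rfl
            · rw [if_neg (by intro hh; exact hlen hh.2), h37]; rfl
          rw [hLHS]
          cases hdw : t.dropWhile (· ≠ '%') with
          | nil =>
            simp only [List.flatMap_cons, List.flatMap_nil, List.append_nil, hseg]
            rw [ih t (by simp at h; omega) (fun d hd => hdom d (by simp [hd])), hdw]
            simp
          | cons z r =>
            simp only [List.flatMap_cons, hseg]
            rw [ih t (by simp at h; omega) (fun d hd => hdom d (by simp [hd])), hdw]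
            simp
      · have hcd : pvDomChar c = true := hdom c (by simp)
        rw [List.takeWhile_cons, List.dropWhile_cons]
        simp only [hc, ne_eq, not_false_eq_true, decide_true, if_true, pvEncode_cons]
        rw [pvWalkA]
        simp only [hc, false_and, if_false]
        rw [ih t (by simp at h; omega) (fun d hd => hdom d (by simp [hd]))]
        simp

-- ===== state-machine decoder = A's structural decoder =====
lemma pvUtfRun_nil (st : Option (Nat × Nat × Nat × Nat)) :
    pvUtfRun st [] = (match st with | none => [] | some _ => ['\uFFFD']) := rfl

lemma pvUtfRun_cons (st : Option (Nat × Nat × Nat × Nat)) (b : Nat) (rest : List Nat) :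
    pvUtfRun st (b :: rest) = (pvUtfStep st b).1 ++ pvUtfRun (pvUtfStep st b).2 rest := rfl

-- replay: a continuation byte out of range emits U+FFFD and restarts on the same byte
lemma pvUtfRun_replay (need acc lo hi b : Nat) (rest : List Nat)
    (hout : ¬(lo ≤ b ∧ b ≤ hi)) :
    pvUtfRun (some (need, acc, lo, hi)) (b :: rest) = '\uFFFD' :: pvUtfRun none (b :: rest) := by
  rw [pvUtfRun_cons, pvUtfRun_cons]
  simp [pvUtfStep, hout]

lemma pvUtfStep_mid (need acc lo hi b : Nat) (h : lo ≤ b ∧ b ≤ hi) (hne : need ≠ 1) :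
    pvUtfStep (some (need, acc, lo, hi)) b =
      ([], some (need - 1, (acc <<< 6) + (b - 0x80), 0x80, 0xBF)) := by
  simp [pvUtfStep, h, hne]

lemma pvUtfStep_last (acc lo hi b : Nat) (h : lo ≤ b ∧ b ≤ hi) :
    pvUtfStep (some (1, acc, lo, hi)) b =
      ([Char.ofNat ((acc <<< 6) + (b - 0x80))], none) := by
  simp [pvUtfStep, h]

lemma utfRun_eq (n : Nat) : ∀ (l : List Nat), l.length ≤ n →
    pvUtfRun none l = pvDecodeReplace l := by
  induction n with
  | zero =>
    intro l h
    interval_cases hl : l.length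
    rw [List.length_eq_zero_iff] at hl; subst hl
    rw [pvUtfRun_nil, pvDecodeReplace.eq_def]
  | succ n ih =>
    intro l h
    cases l with
    | nil => rw [pvUtfRun_nil, pvDecodeReplace.eq_def]
    | cons b rest =>
      have hlen : rest.length ≤ n := by simp at h; omega
      rw [pvUtfRun_cons, pvDecodeReplace.eq_def]
      dsimp only
      by_cases h80 : b < 0x80
      · rw [if_pos h80]
        simp only [pvUtfStep, pvUtfLead, h80, if_true]
        rw [ih rest hlen]
        rfl
      · rw [if_neg h80]
        by_cases h2b : 0xC2 ≤ b ∧ b ≤ 0xDF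
        · -- two-byte lead
          rw [if_pos h2b,
            show pvUtfStep none b = ([], some (1, b - 0xC0, 0x80, 0xBF)) by
              simp only [pvUtfStep, pvUtfLead]
              rw [if_neg h80, if_neg (by omega), if_pos h2b.2]]
          cases rest with
          | nil => rfl
          | cons b1 r1 =>
            dsimp only
            by_cases hc1 : pvCont b1
            · have hc1' : 0x80 ≤ b1 ∧ b1 ≤ 0xBF := by simpa [pvCont] using hc1
              rw [if_pos hc1, pvUtfRun_cons, pvUtfStep_last _ _ _ _ hc1',
                ih r1 (by simp at hlen ⊢; omega)]
              rfl
            · have hc1' : ¬(0x80 ≤ b1 ∧ b1 ≤ 0xBF) := by simpa [pvCont] using hc1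
              rw [if_neg (by simpa using hc1), pvUtfRun_replay _ _ _ _ _ _ hc1',
                ih (b1 :: r1) (by simpa using hlen)]
              rfl
        · by_cases h3b : 0xE0 ≤ b ∧ b ≤ 0xEF
          · -- three-byte lead
            rw [if_neg h2b, if_pos h3b,
              show pvUtfStep none b = ([], some (2, b - 0xE0,
                  if b = 0xE0 then 0xA0 else 0x80, if b = 0xED then 0x9F else 0xBF)) by
                simp only [pvUtfStep, pvUtfLead]
                rw [if_neg h80, if_neg (by omega), if_neg (by omega), if_pos h3b.2]]
            cases rest with
            | nil => rfl
            | cons b1 r1 =>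
              dsimp only
              by_cases hr1 : (if b = 0xE0 then 0xA0 else 0x80) ≤ b1 ∧
                  b1 ≤ (if b = 0xED then 0x9F else 0xBF)
              · rw [if_pos hr1, pvUtfRun_cons, pvUtfStep_mid _ _ _ _ _ hr1 (by omega)]
                cases r1 with
                | nil => rfl
                | cons b2 r2 =>
                  dsimp only
                  by_cases hc2 : pvCont b2
                  · have hc2' : 0x80 ≤ b2 ∧ b2 ≤ 0xBF := by simpa [pvCont] using hc2
                    rw [if_pos hc2, pvUtfRun_cons, pvUtfStep_last _ _ _ _ hc2',
                      ih r2 (by simp at hlen ⊢; omega),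
                      show ((b - 0xE0) <<< 6 + (b1 - 0x80)) <<< 6 + (b2 - 0x80)
                          = (b - 0xE0) <<< 12 + (b1 - 0x80) <<< 6 + (b2 - 0x80) by
                        simp only [Nat.shiftLeft_eq]; ring]
                    rfl
                  · have hc2' : ¬(0x80 ≤ b2 ∧ b2 ≤ 0xBF) := by simpa [pvCont] using hc2
                    rw [if_neg (by simpa using hc2), pvUtfRun_replay _ _ _ _ _ _ hc2',
                      ih (b2 :: r2) (by simp at hlen ⊢; omega)]
                    rfl
              · rw [if_neg hr1, pvUtfRun_replay _ _ _ _ _ _ hr1,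
                  ih (b1 :: r1) (by simpa using hlen)]
                rfl
          · by_cases h4b : 0xF0 ≤ b ∧ b ≤ 0xF4
            · -- four-byte lead
              rw [if_neg h2b, if_neg h3b, if_pos h4b,
                show pvUtfStep none b = ([], some (3, b - 0xF0,
                    if b = 0xF0 then 0x90 else 0x80, if b = 0xF4 then 0x8F else 0xBF)) by
                  simp only [pvUtfStep, pvUtfLead]
                  rw [if_neg h80, if_neg (by omega), if_neg (by omega), if_neg (by omega),
                    if_pos h4b.2]]
              cases rest with
              | nil => rfl
              | cons b1 r1 =>
                dsimp only
                by_cases hr1 : (if b = 0xF0 then 0x90 else 0x80) ≤ b1 ∧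
                    b1 ≤ (if b = 0xF4 then 0x8F else 0xBF)
                · rw [if_pos hr1, pvUtfRun_cons, pvUtfStep_mid _ _ _ _ _ hr1 (by omega)]
                  cases r1 with
                  | nil => rfl
                  | cons b2 r2 =>
                    dsimp only
                    by_cases hc2 : pvCont b2
                    · have hc2' : 0x80 ≤ b2 ∧ b2 ≤ 0xBF := by simpa [pvCont] using hc2
                      rw [if_pos hc2, pvUtfRun_cons, pvUtfStep_mid _ _ _ _ _ hc2' (by omega)]
                      cases r2 with
                      | nil => rfl
                      | cons b3 r3 =>
                        dsimp only
                        by_cases hc3 : pvCont b3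
                        · have hc3' : 0x80 ≤ b3 ∧ b3 ≤ 0xBF := by simpa [pvCont] using hc3
                          rw [if_pos hc3, pvUtfRun_cons, pvUtfStep_last _ _ _ _ hc3',
                            ih r3 (by simp at hlen ⊢; omega),
                            show (((b - 0xF0) <<< 6 + (b1 - 0x80)) <<< 6 + (b2 - 0x80)) <<< 6 + (b3 - 0x80)
                                = (b - 0xF0) <<< 18 + (b1 - 0x80) <<< 12 + (b2 - 0x80) <<< 6 + (b3 - 0x80) by
                              simp only [Nat.shiftLeft_eq]; ring]
                          rfl
                        · have hc3' : ¬(0x80 ≤ b3 ∧ b3 ≤ 0xBF) := by simpa [pvCont] using hc3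
                          rw [if_neg (by simpa using hc3), pvUtfRun_replay _ _ _ _ _ _ hc3',
                            ih (b3 :: r3) (by simp at hlen ⊢; omega)]
                          rfl
                    · have hc2' : ¬(0x80 ≤ b2 ∧ b2 ≤ 0xBF) := by simpa [pvCont] using hc2
                      rw [if_neg (by simpa using hc2), pvUtfRun_replay _ _ _ _ _ _ hc2',
                        ih (b2 :: r2) (by simp at hlen ⊢; omega)]
                      rfl
                · rw [if_neg hr1, pvUtfRun_replay _ _ _ _ _ _ hr1,
                    ih (b1 :: r1) (by simpa using hlen)]
                  rfl
            · -- invalid lead byte (0x80-0xC1 or >= 0xF5)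
              rw [if_neg h2b, if_neg h3b, if_neg h4b,
                show pvUtfStep none b = (['\uFFFD'], none) by
                  simp only [pvUtfStep, pvUtfLead]
                  by_cases hlt : b < 0xC2
                  · rw [if_neg h80, if_pos hlt]
                  · rw [if_neg h80, if_neg hlt, if_neg (by omega), if_neg (by omega),
                      if_neg (by omega)],
                ih rest hlen]
              rfl

lemma pvSplit_chars_sub (c : Char) :
    ∀ (s : List Char), ∀ p ∈ pvSplit c s, ∀ x ∈ p, x ∈ s := by
  intro s
  induction s with
  | nil => intro p hp x hx; simp [pvSplit] at hp; subst hp; simp at hx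
  | cons x0 t ih =>
    intro p hp x hx
    by_cases h0 : x0 = c
    · rw [h0, show pvSplit c (c :: t) = [] :: pvSplit c t by simp [pvSplit]] at hp
      rcases List.mem_cons.mp hp with h | h
      · subst h; simp at hx
      · exact List.mem_cons_of_mem _ (ih p h x hx)
    · simp only [pvSplit, h0, if_false] at hp
      cases hsp : pvSplit c t with
      | nil => exact absurd hsp (pvSplit_ne_nil c t)
      | cons q qs =>
        rw [hsp] at hp
        rcases List.mem_cons.mp hp with h | h
        · subst h
          rcases List.mem_cons.mp hx with h' | h'
          · exact h' ▸ List.mem_cons_self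
          · exact List.mem_cons_of_mem _ (ih q (hsp ▸ List.mem_cons_self) x h')
        · exact List.mem_cons_of_mem _ (ih p (hsp ▸ List.mem_cons_of_mem _ h) x hx)

lemma dom_replace (s : List Char) (hdom : ∀ c ∈ s, pvDomChar c = true) :
    ∀ c ∈ PySem.Chars.replace s ['+'] [' '], pvDomChar c = true := by
  rw [replace_single]
  intro c hc
  rcases List.mem_map.mp hc with ⟨d, hd, hdc⟩
  by_cases hdp : d = '+'
  · rw [← hdc]; simp [hdp]; decide
  · rw [← hdc]; simp [hdp]; exact hdom d hd

lemma percent_decode_eq (s : List Char) (hdom : ∀ c ∈ s, pvDomChar c = true) :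
    pvPercentDecodeAlt s = pvPercentDecode s := by
  rw [pvPercentDecodeAlt, pvPercentDecode]
  rw [splitOn_single]
  rw [pvSplit_head_tail]
  dsimp only
  rw [PySem.List.foldl_append_eq_flatMap, pvEncB_eq]
  rw [utfRun_eq _ _ le_rfl]
  rw [walk_eq (PySem.Chars.replace s ['+'] [' ']).length _ le_rfl (dom_replace s hdom)]

lemma span_aux (c : Char) :
    ∀ (l : List Char) (n : Nat), (∀ i < n, l[i]? ≠ some c) → l[n]? = some c →
      l.takeWhile (· ≠ c) = l.take n ∧ l.dropWhile (· ≠ c) = l.drop n := by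
  intro l
  induction l with
  | nil => intro n _ hn; simp at hn
  | cons x t ih =>
    intro n hlt hn
    cases n with
    | zero =>
      simp at hn; subst hn
      constructor
      · simp [List.takeWhile_cons]
      · simp [List.dropWhile_cons]
    | succ m =>
      have hx : x ≠ c := by
        have := hlt 0 (Nat.succ_pos m); simpa using this
      have ih' := ih m (fun i hi => by
          have := hlt (i+1) (Nat.succ_lt_succ hi); simpa using this)
        (by simpa using hn)
      have hconv : (fun x => !decide (x = c)) = (fun x : Char => decide (x ≠ c)) := by
        funext z; simp
      constructor
      · rw [List.takeWhile_cons, List.take_succ_cons]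
        simp only [hx, ne_eq, decide_not, not_false_eq_true, decide_true, Bool.not_false, if_true]
        rw [hconv]; exact congrArg (x :: ·) ih'.1
      · rw [List.dropWhile_cons, List.drop_succ_cons]
        simp only [hx, ne_eq, decide_not, not_false_eq_true, decide_true, Bool.not_false, if_true]
        rw [hconv]; exact ih'.2

lemma kv_eq (part : List Char) :
    (if PySem.Chars.isIn ['='] part then
        match PySem.Chars.splitOnMax part ['='] 1 with
        | [k, v] => (k, v)
        | _ => (part, ([] : List Char))
      else (part, ([] : List Char))) =
    (part.takeWhile (· ≠ '='), (part.dropWhile (· ≠ '=')).drop 1) := by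
  by_cases hin : '=' ∈ part
  · rw [if_pos ((PySem.Chars.isIn_iff_infix _ _).mpr ((List.singleton_infix_iff '=' part).mpr hin))]
    rw [splitOnMax_one]
    cases hdw : part.dropWhile (· ≠ '=') with
    | nil =>
      rw [List.dropWhile_eq_nil_iff] at hdw
      have h2 := hdw '=' hin
      simp at h2
    | cons z r => simp
  · rw [if_neg (by
      rw [show (¬PySem.Chars.isIn ['='] part = true) ↔ PySem.Chars.isIn ['='] part = false by simp,
        PySem.Chars.isIn_eq_false_iff]
      exact fun hh => hin ((List.singleton_infix_iff '=' part).mp hh))]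
    have htw : part.takeWhile (· ≠ '=') = part :=
      List.takeWhile_eq_self_iff.mpr (fun x hx => by
        simp; exact fun he => hin (he ▸ hx))
    have hdw : part.dropWhile (· ≠ '=') = [] :=
      List.dropWhile_eq_nil_iff.mpr (fun x hx => by
        simp; exact fun he => hin (he ▸ hx))
    rw [htw, hdw]
    simp

lemma getElem?_eq_some_char (l : List Char) (i : Nat) (c : Char) (h : l[i]? = some c) :
    ∃ u, l.drop i = c :: u := by
  have hd : (l.drop i)[0]? = some c := by
    rw [List.getElem?_drop]; simpa using h
  cases hdr : l.drop i with
  | nil => rw [hdr] at hd; simp at hd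
  | cons z u =>
    rw [hdr] at hd; simp at hd
    exact ⟨u, by rw [hd]⟩

lemma parts_eq_main (raw_path : String) (hdl : ∀ c ∈ raw_path.toList, pvDomChar c = true) :
    parse_path_and_query raw_path = parse_path_and_query_alt raw_path := by
  simp only [parse_path_and_query, parse_path_and_query_alt]
  by_cases hq : PySem.Chars.find raw_path.toList ['?'] = -1
  · rw [if_pos hq]
    have hni : ¬ ['?'] <:+: raw_path.toList := (PySem.Chars.find_eq_neg_one_iff _ _).mp hq
    have hnm : '?' ∉ raw_path.toList := fun hm => hni ((List.singleton_infix_iff _ _).mpr hm)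
    have hdwl : raw_path.toList.dropWhile (· ≠ '?') = [] :=
      List.dropWhile_eq_nil_iff.mpr (fun x hx => by
        simp; exact fun he => hnm (he ▸ hx))
    rw [hdwl]
  · rw [if_neg hq]
    have h0 : 0 ≤ PySem.Chars.find raw_path.toList ['?'] := by
      have := PySem.Chars.neg_one_le_find raw_path.toList ['?']; omega
    obtain ⟨hpfx, hmin⟩ := PySem.Chars.find_spec h0
    set l := raw_path.toList with hl
    set qn := (PySem.Chars.find l ['?']).toNat with hqn
    obtain ⟨u, hu⟩ := hpfx
    have hdropq : l.drop qn = '?' :: u := by rw [← hu]; rfl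
    have hq_at : l[qn]? = some '?' := by
      rw [show l[qn]? = (l.drop qn)[0]? by rw [List.getElem?_drop, Nat.add_zero], hdropq]; rfl
    have hlt : ∀ i < qn, l[i]? ≠ some '?' := by
      intro i hi hsome
      obtain ⟨w, hw⟩ := getElem?_eq_some_char l i '?' hsome
      exact hmin i hi ⟨w, by rw [hw]; rfl⟩
    have hspan := span_aux '?' l qn hlt hq_at
    have hslice_to : PySem.Chars.slice l none (some (PySem.Chars.find l ['?'])) = l.take qn := by
      rw [PySem.Chars.slice_eq_listSlice, PySem.List.slice_to l h0]
    have hslice_from : PySem.Chars.slice l (some (PySem.Chars.find l ['?'] + 1)) none = u := by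
      rw [PySem.Chars.slice_eq_listSlice, PySem.List.slice_from l (by omega)]
      have htn : (PySem.Chars.find l ['?'] + 1).toNat = qn + 1 := by omega
      rw [htn]
      have hdd : l.drop (qn + 1) = (l.drop qn).drop 1 := by
        rw [List.drop_drop, Nat.add_comm]
      rw [hdd, hdropq]
      rfl
    rw [hslice_to, hslice_from, hspan.1, hspan.2, hdropq]
    refine congrArg (fun p => (String.ofList (l.take qn), PySem.Dict.items p)) ?_
    rw [List.foldl_map, List.foldl_filter]
    apply PySem.List.foldl_congr_mem
    intro acc part hpart
    have hpdom : ∀ c ∈ part, pvDomChar c = true := by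
      intro c hc
      apply hdl
      have h1 : c ∈ u := by
        rw [splitOn_single] at hpart
        exact pvSplit_chars_sub '&' u part hpart c hc
      have h2 : u ⊆ l := by
        intro z hz
        have : z ∈ l.drop qn := by rw [hdropq]; exact List.mem_cons_of_mem _ hz
        exact List.drop_subset _ _ this
      exact h2 h1
    by_cases hemp : part.isEmpty
    · rw [if_pos hemp]; simp [hemp]
    · rw [if_neg hemp, kv_eq part,
        if_pos (show (!part.isEmpty) = true by simp [hemp])]
      have hk : pvPercentDecodeAlt (part.takeWhile (· ≠ '=')) =
          pvPercentDecode (part.takeWhile (· ≠ '=')) :=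
        percent_decode_eq _ (fun c hc => hpdom c ((List.takeWhile_prefix _).subset hc))
      have hv : pvPercentDecodeAlt ((part.dropWhile (· ≠ '=')).drop 1) =
          pvPercentDecode ((part.dropWhile (· ≠ '=')).drop 1) :=
        percent_decode_eq _ (fun c hc =>
          hpdom c ((List.dropWhile_suffix _).subset (List.drop_subset _ _ hc)))
      rw [hk, hv]

-- ===== VERDICT (by name: the statement is the Claim_ definition above) =====
theorem parse_path_and_query_spec : Claim_equal_parse_path_and_query := by
  intro raw_path hdom
  unfold Spec_parse_path_and_query
  have hdl : ∀ c ∈ raw_path.toList, pvDomChar c = true := by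
    unfold Dom_parse_path_and_query pvDomStr at hdom
    rw [List.all_eq_true] at hdom
    exact hdom
  exact parts_eq_main raw_path hdl
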